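-- pv_equiv track=rewrite | github.com/Harinandan-37/AutomateTheBoringStuff | Dictionary/ChessDict.py | isValidPlace
-- ===== SOURCE A (Python) =====
-- def isValidPlace(board):
--     placeCount = 0
--     squares = {'0':'a', '1':'b', '2':'c', '3':'d', '4':'e', '5':'f', '6':'g', '7':'h'}
--
--     for i,j in board.items():
--         for x in range(1,9,1):
--             for y in range(8):
--                 if i == str(x) + squares[str(y)]:
--                     placeCount += 1
--     if len(board) <= 32 and placeCount == len(board):
--         return 1
--
--     return -1
-- ===== SOURCE B (Python) =====
-- def isValidPlace(board):
--     ok = all(isinstance(k, str) and len(k) == 2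
--              and k[0] in "12345678" and k[1] in "abcdefgh"
--              for k in board)
--     return 1 if len(board) <= 32 and ok else -1
-- ===== Notes on version B (the rewrite author's own statement) =====
-- stated objective: simpler
-- what changed: A generates all 64 square names per key with triple-nested loops and counts matches; B validates each key directly by its two characters (len==2, row in '12345678', column in 'abcdefgh') and uses all(), removing the inner loops.
import Mathlib
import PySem

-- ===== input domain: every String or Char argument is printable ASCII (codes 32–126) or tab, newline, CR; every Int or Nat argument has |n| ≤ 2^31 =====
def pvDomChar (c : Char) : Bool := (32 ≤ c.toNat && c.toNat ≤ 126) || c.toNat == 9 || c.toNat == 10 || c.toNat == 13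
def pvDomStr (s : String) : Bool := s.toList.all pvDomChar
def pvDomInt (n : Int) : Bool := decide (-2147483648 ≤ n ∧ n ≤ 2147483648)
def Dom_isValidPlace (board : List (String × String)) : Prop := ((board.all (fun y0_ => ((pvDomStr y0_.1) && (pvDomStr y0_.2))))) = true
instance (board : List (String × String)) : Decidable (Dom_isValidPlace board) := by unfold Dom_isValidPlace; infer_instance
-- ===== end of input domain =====

-- B replaces A's triple-nested generate-and-compare (64 candidate square names per key) by a direct
-- two-character structural check of each key (simpler, one pass over the keys).

-- ===== PORT A =====
-- the literal dict squares = {'0':'a', …, '7':'h'}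
def pvSquares : PySem.Dict String String :=
  PySem.Dict.ofList [("0","a"),("1","b"),("2","c"),("3","d"),("4","e"),("5","f"),("6","g"),("7","h")]

-- str(x) + squares[str(y)], built and compared on the List Char side (String equality is exactly
-- toList equality, so the comparison is exact); squares[str(y)] cannot raise a KeyError (every
-- y ∈ 0..7 is a key), so getD's default "" is never used
def pvKeyFn (x y : Int) : List Char :=
  (PySem.Int.toStr x).toList ++ (PySem.Dict.getD pvSquares (PySem.Int.toStr y) "").toList

def isValidPlace (board : List (String × String)) : Int :=
  let placeCount : Int := board.foldl (fun pc ij =>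
    (PySem.List.pyRange 1 9 1).foldl (fun pc x =>
      (PySem.List.pyRange 0 8 1).foldl (fun pc y =>
        if ij.1.toList = pvKeyFn x y then pc + 1 else pc) pc) pc) 0
  if (board.length : Int) ≤ 32 ∧ placeCount = (board.length : Int) then 1 else -1

-- ===== PORT B =====
-- len(k) == 2 and k[0] in "12345678" and k[1] in "abcdefgh"  (keys are Strings here, so Source B's
-- isinstance(k, str) guard is vacuously true)
def validSquareKey (k : String) : Bool :=
  match k.toList with
  | [c1, c2] => "12345678".toList.contains c1 && "abcdefgh".toList.contains c2
  | _ => false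

def isValidPlace_alt (board : List (String × String)) : Int :=
  if (board.length : Int) ≤ 32 ∧ board.all (fun p => validSquareKey p.1) then 1 else -1

-- ===== PRECONDITION & SPEC =====
def Spec_isValidPlace (board : List (String × String)) (out : Int) : Prop := out = isValidPlace_alt board
instance (board : List (String × String)) (out : Int) : Decidable (Spec_isValidPlace board out) := by unfold Spec_isValidPlace; infer_instance

-- ===== CLAIM (what is proved, stated in full; the proofs are below) =====
def Claim_equal_isValidPlace : Prop := ∀ (board : List (String × String)), Dom_isValidPlace board → Spec_isValidPlace board (isValidPlace board)

-- ===== LEMMAS AND PROOFS =====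

-- the 64 square names A generates, in generation order
def pvL : List (List Char) :=
  (PySem.List.pyRange 1 9 1).flatMap (fun x => (PySem.List.pyRange 0 8 1).map (pvKeyFn x))

lemma pvL_eq : pvL = "12345678".toList.flatMap (fun d => "abcdefgh".toList.map (fun l => [d, l])) := by
  decide

lemma mem_pvL (cs : List Char) :
    cs ∈ pvL ↔ ∃ d ∈ "12345678".toList, ∃ l ∈ "abcdefgh".toList, [d, l] = cs := by
  rw [pvL_eq]; simp only [List.mem_flatMap, List.mem_map]

-- B's per-key check accepts exactly the 64 square names A generates
lemma validSquareKey_iff (k : String) : validSquareKey k = true ↔ k.toList ∈ pvL := by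
  unfold validSquareKey
  rcases hk : k.toList with _ | ⟨c1, _ | ⟨c2, _ | ⟨c3, t⟩⟩⟩
  · rw [mem_pvL]; simp
  · rw [mem_pvL]; simp
  · rw [mem_pvL]
    simp only [Bool.and_eq_true, List.contains_iff_mem]
    constructor
    · rintro ⟨h1, h2⟩; exact ⟨c1, h1, c2, h2, rfl⟩
    · rintro ⟨d, hd, l, hl, h⟩
      simp only [List.cons.injEq, and_true] at h
      obtain ⟨rfl, rfl⟩ := h
      exact ⟨hd, hl⟩
  · rw [mem_pvL]; simp

-- A's inner 8×8 generate-and-compare loops add 1 exactly when the key is one of the 64 square names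
lemma inner_loops (cs : List Char) (pc : Int) :
    (PySem.List.pyRange 1 9 1).foldl (fun pc x =>
      (PySem.List.pyRange 0 8 1).foldl (fun pc y =>
        if cs = pvKeyFn x y then pc + 1 else pc) pc) pc
    = pc + (if cs ∈ pvL then 1 else 0) := by
  have h1 : ∀ (x a : Int),
      (PySem.List.pyRange 0 8 1).foldl (fun pc y => if cs = pvKeyFn x y then pc + 1 else pc) a
      = a + ((PySem.List.pyRange 0 8 1).countP (fun y => decide (cs = pvKeyFn x y)) : Int) := by
    intro x a
    exact PySem.List.foldl_ite_add_one (fun y => cs = pvKeyFn x y) _ a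
  simp only [h1]
  rw [PySem.List.foldl_add]
  have h2 : ((PySem.List.pyRange 1 9 1).map
      (fun x => ((PySem.List.pyRange 0 8 1).countP (fun y => decide (cs = pvKeyFn x y)) : Int))).sum
      = (pvL.countP (fun ds => decide (cs = ds)) : Int) := by
    rw [pvL, List.countP_flatMap]
    rw [Nat.cast_list_sum, List.map_map]
    congr 1
  rw [h2]
  have h3 : pvL.countP (fun ds => decide (cs = ds)) = pvL.count cs := by
    rw [List.count_eq_countP]
    apply List.countP_congr
    intro ds _
    by_cases h : cs = ds
    · subst h; simp
    · simp [h, Ne.symm h]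
  have hnd : pvL.Nodup := by decide
  rw [h3, hnd.count]
  split <;> simp

-- A's placeCount is the number of keys B's check accepts
lemma placeCount_eq (board : List (String × String)) :
    board.foldl (fun pc ij =>
      (PySem.List.pyRange 1 9 1).foldl (fun pc x =>
        (PySem.List.pyRange 0 8 1).foldl (fun pc y =>
          if ij.1.toList = pvKeyFn x y then pc + 1 else pc) pc) pc) 0
    = (board.countP (fun ij => validSquareKey ij.1) : Int) := by
  have hfun : (fun (pc : Int) (ij : String × String) =>
      (PySem.List.pyRange 1 9 1).foldl (fun pc x =>
        (PySem.List.pyRange 0 8 1).foldl (fun pc y =>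
          if ij.1.toList = pvKeyFn x y then pc + 1 else pc) pc) pc)
      = (fun (pc : Int) (ij : String × String) => if validSquareKey ij.1 = true then pc + 1 else pc) := by
    funext pc ij
    rw [inner_loops]
    by_cases h : ij.1.toList ∈ pvL
    · simp [h, (validSquareKey_iff ij.1).mpr h]
    · have : ¬ validSquareKey ij.1 = true := fun hv => h ((validSquareKey_iff ij.1).mp hv)
      simp [h, this]
  rw [hfun, PySem.List.foldl_ite_add_one (fun ij : String × String => validSquareKey ij.1 = true)]
  simp

-- ===== VERDICT =====
theorem isValidPlace_spec : Claim_equal_isValidPlace := by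
  intro board _
  unfold Spec_isValidPlace isValidPlace isValidPlace_alt
  rw [placeCount_eq]
  have hcond : ((board.countP (fun ij => validSquareKey ij.1) : Int) = (board.length : Int))
      ↔ (board.all (fun p => validSquareKey p.1) = true) := by
    rw [Int.natCast_inj, List.countP_eq_length, List.all_eq_true]
  exact if_congr (and_congr Iff.rfl hcond) rfl rfl
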